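-- pv_equiv track=rewrite | github.com/daithang59/Lab06-AnToanMangMayTinh | crypto/charset_filter.py | validate_and_filter
-- ===== SOURCE A (Python) =====
-- import string
--
-- ALLOWED_CHARSET = set(
--     string.ascii_lowercase + string.ascii_uppercase + string.digits + " .,;:?!'\"-()"
-- )
--
-- def filter_charset(
--     text: str, keep_unknown: bool = False, replacement: str = " "
-- ) -> str:
--     """
--     Lọc text chỉ giữ lại các ký tự được phép theo đề bài.
--
--     Args:
--         text: Chuỗi cần lọc
--         keep_unknown: Nếu True, giữ nguyên ký tự không cho phép.
--                       Nếu False (default), thay thế bằng replacement.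
--         replacement: Ký tự thay thế cho ký tự không hợp lệ (default: space)
--
--     Returns:
--         Chuỗi đã được lọc
--
--     Examples:
--         >>> filter_charset("Hello@World#123!")
--         'Hello World 123!'
--
--         >>> filter_charset("Café", keep_unknown=True)
--         'Café'
--
--         >>> filter_charset("Test™", keep_unknown=False)
--         'Test '
--     """
--     if keep_unknown:
--         return text
--
--     result = []
--     for c in text:
--         if c in ALLOWED_CHARSET:
--             result.append(c)
--         else:
--             result.append(replacement)
--
--     return "".join(result)
--
-- def validate_and_filter(
--     text: str, cipher_name: str = "cipher"
-- ) -> tuple[bool, str, str]: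
--     """
--     Validate và filter text, trả về (is_valid, filtered_text, warning_message).
--
--     Args:
--         text: Text cần validate
--         cipher_name: Tên thuật toán (để hiển thị trong warning)
--
--     Returns:
--         Tuple (is_valid, filtered_text, warning_message)
--         - is_valid: True nếu không có ký tự lạ, False nếu có
--         - filtered_text: Text đã được lọc
--         - warning_message: Cảnh báo về ký tự bị loại bỏ (nếu có)
--
--     Examples:
--         >>> validate_and_filter("Hello World!", "Caesar")
--         (True, "Hello World!", "")
--
--         >>> validate_and_filter("Hello™World", "Vigenere")
--         (False, "Hello World", "Warning: 1 ký tự không hợp lệ đã bị thay thế...")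
--     """
--     # Đếm số ký tự không hợp lệ
--     invalid_chars = set()
--     for c in text:
--         if c not in ALLOWED_CHARSET:
--             invalid_chars.add(c)
--
--     # Filter text
--     filtered_text = filter_charset(text, keep_unknown=False, replacement=" ")
--
--     # Tạo warning message nếu có ký tự không hợp lệ
--     if invalid_chars:
--         invalid_count = sum(1 for c in text if c not in ALLOWED_CHARSET)
--         warning = (
--             f"⚠️ Phát hiện {invalid_count} ký tự không nằm trong tập cho phép "
--             f"(a-z, A-Z, 0-9, space, .,;:?!'\"-(). "
--             f"Các ký tự này đã được thay thế bằng khoảng trắng. "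
--             f"Ký tự bị loại: {', '.join(repr(c) for c in sorted(invalid_chars)[:10])}"
--         )
--         return False, filtered_text, warning
--
--     return True, filtered_text, ""
-- ===== SOURCE B (Python) =====
-- import string
--
-- ALLOWED_CHARSET = set(
--     string.ascii_lowercase + string.ascii_uppercase + string.digits + " .,;:?!'\"-()"
-- )
--
-- def validate_and_filter(text: str, cipher_name: str = "cipher") -> tuple[bool, str, str]:
--     # Single pass: filtered result, multiplicity count and distinct-set in one loop.
--     result = []
--     invalid_count = 0
--     invalid_chars = set()
--     for c in text:
--         if c in ALLOWED_CHARSET: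
--             result.append(c)
--         else:
--             result.append(" ")
--             invalid_count += 1
--             invalid_chars.add(c)
--     filtered_text = "".join(result)
--     if not invalid_chars:
--         return True, filtered_text, ""
--     warning = (
--         f"⚠️ Phát hiện {invalid_count} ký tự không nằm trong tập cho phép "
--         f"(a-z, A-Z, 0-9, space, .,;:?!'\"-(). "
--         f"Các ký tự này đã được thay thế bằng khoảng trắng. "
--         f"Ký tự bị loại: {', '.join(repr(c) for c in sorted(invalid_chars)[:10])}"
--     )
--     return False, filtered_text, warning
-- ===== Notes on version B (the rewrite author's own statement) =====
-- stated objective: simpler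
-- what changed: Replaces A's three separate traversals of text (a set-building loop, the filter_charset helper's loop, and a recount generator-sum) with one loop that simultaneously builds the filtered characters, the invalid multiplicity count and the distinct invalid-char set.
import Mathlib
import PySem

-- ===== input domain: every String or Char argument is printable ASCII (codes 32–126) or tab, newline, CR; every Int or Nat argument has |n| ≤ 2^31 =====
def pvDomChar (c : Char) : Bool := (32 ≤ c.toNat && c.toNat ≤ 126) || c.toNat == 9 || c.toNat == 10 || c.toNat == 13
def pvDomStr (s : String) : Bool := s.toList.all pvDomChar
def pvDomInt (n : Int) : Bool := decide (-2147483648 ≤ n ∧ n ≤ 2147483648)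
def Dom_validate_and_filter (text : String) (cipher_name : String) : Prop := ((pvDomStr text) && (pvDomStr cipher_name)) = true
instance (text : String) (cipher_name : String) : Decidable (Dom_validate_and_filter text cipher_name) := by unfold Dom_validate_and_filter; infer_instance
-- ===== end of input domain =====

-- B replaces A's three traversals of text (set-building loop, filter_charset loop, recount sum)
-- with one loop maintaining the filtered chars, the invalid count and the invalid-char set (objective: simpler).


-- ===== PORT A =====
-- module constant: set(ascii_lowercase + ascii_uppercase + digits + " .,;:?!'\"-()")
def ALLOWED_CHARSET : PySem.Set Char :=
  PySem.Set.ofList ("abcdefghijklmnopqrstuvwxyzABCDEFGHIJKLMNOPQRSTUVWXYZ0123456789 .,;:?!'\"-()".toList)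

-- Python's repr(c); exact for the single printable-ASCII / tab / newline / CR characters of Dom
def pyReprChar (c : Char) : String :=
  if c = '\\' then "'\\\\'"
  else if c = '\t' then "'\\t'"
  else if c = '\n' then "'\\n'"
  else if c = '\r' then "'\\r'"
  else if c = '\'' then "\"'\""
  else String.mk ['\'', c, '\'']

-- the warning f-string, shared verbatim by both Pythons
def buildWarning (invalid_count : Int) (invalid_chars : PySem.Set Char) : String :=
  "⚠️ Phát hiện " ++ PySem.Int.toStr invalid_count ++
  " ký tự không nằm trong tập cho phép (a-z, A-Z, 0-9, space, .,;:?!'\"-(). " ++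
  "Các ký tự này đã được thay thế bằng khoảng trắng. Ký tự bị loại: " ++
  PySem.Str.join ", "
    ((PySem.List.slice (PySem.List.sorted invalid_chars (fun c => c) false) none (some 10)).map pyReprChar)

def filter_charset (text : String) (keep_unknown : Bool) (replacement : String) : String :=
  if keep_unknown then text
  else String.mk (text.toList.foldl
    (fun result c => if PySem.Set.contains ALLOWED_CHARSET c then result ++ [c]
                     else result ++ replacement.toList) [])

def validate_and_filter (text : String) (cipher_name : String) : Bool × String × String :=
  let invalid_chars : PySem.Set Char :=
    text.toList.foldl
      (fun s c => if !(PySem.Set.contains ALLOWED_CHARSET c) then PySem.Set.add s c else s)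
      PySem.Set.empty
  let filtered_text := filter_charset text false " "
  if invalid_chars ≠ [] then
    let invalid_count : Int := ((text.toList.countP (fun c => !(PySem.Set.contains ALLOWED_CHARSET c)) : Nat) : Int)
    (false, filtered_text, buildWarning invalid_count invalid_chars)
  else
    (true, filtered_text, "")

-- ===== PORT B =====
def validate_and_filter_alt (text : String) (cipher_name : String) : Bool × String × String :=
  let st :=
    text.toList.foldl
      (fun (st : List Char × Int × PySem.Set Char) c =>
        if PySem.Set.contains ALLOWED_CHARSET c then (st.1 ++ [c], st.2.1, st.2.2)
        else (st.1 ++ [' '], st.2.1 + 1, PySem.Set.add st.2.2 c))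
      ([], 0, PySem.Set.empty)
  let filtered_text := String.mk st.1
  if st.2.2 = ([] : PySem.Set Char) then
    (true, filtered_text, "")
  else
    (false, filtered_text, buildWarning st.2.1 st.2.2)

-- ===== PRECONDITION & SPEC =====
def Spec_validate_and_filter (text : String) (cipher_name : String) (out : Bool × String × String) : Prop := out = validate_and_filter_alt text cipher_name
instance (text : String) (cipher_name : String) (out : Bool × String × String) : Decidable (Spec_validate_and_filter text cipher_name out) := by unfold Spec_validate_and_filter; infer_instance

-- ===== CLAIM (what is proved, stated in full; the proofs are below) =====
def Claim_equal_validate_and_filter : Prop := ∀ (text : String) (cipher_name : String), Dom_validate_and_filter text cipher_name → Spec_validate_and_filter text cipher_name (validate_and_filter text cipher_name)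

-- ===== LEMMAS AND PROOFS =====

-- B's single fold computes A's three traversals at once
theorem fuse (p : Char → Bool) (l : List Char) (r0 : List Char) (c0 : Int) (s0 : PySem.Set Char) :
    l.foldl
      (fun (st : List Char × Int × PySem.Set Char) c =>
        if p c then (st.1 ++ [c], st.2.1, st.2.2)
        else (st.1 ++ [' '], st.2.1 + 1, PySem.Set.add st.2.2 c))
      (r0, c0, s0)
    = (l.foldl (fun result c => if p c then result ++ [c] else result ++ [' ']) r0,
       c0 + ((l.countP (fun c => !(p c)) : Nat) : Int),
       l.foldl (fun s c => if !(p c) then PySem.Set.add s c else s) s0) := by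
  induction l generalizing r0 c0 s0 with
  | nil => simp
  | cons c t ih =>
    by_cases h : p c = true <;> simp [h, ih] <;> ring_nf

-- ===== VERDICT (by name: the statement is the Claim_ definition above) =====
theorem validate_and_filter_spec : Claim_equal_validate_and_filter := by
  intro text cipher_name _
  unfold Spec_validate_and_filter validate_and_filter validate_and_filter_alt filter_charset
  rw [show (" " : String).toList = [' '] from rfl, fuse]
  simp [PySem.Set.empty]
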